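-- pv_equiv track=rewrite | github.com/NikitaDem01/CIAOD | kurstasks.py | firstTask
-- ===== SOURCE A (Python) =====
-- def firstTask(s1, s2):
--     shelp1 = sorted(s1)
--     shelp_1 = ''.join(shelp1)
--     shelp2 = sorted(s2)
--     shelp_2 = ''.join(shelp2)
--     x = 0
--     for i in range(len(s1)):
--         if (shelp_1[i] <= shelp_2[i]):
--             x = x + 1
--     if x == len(s1):
--         return True
--     else:
--         return False
-- ===== SOURCE B (Python) =====
-- def firstTask(s1, s2):
--     n = len(s1)
--     t1 = 0
--     t2 = 0
--     for c in range(128):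
--         t1 += s1.count(chr(c))
--         t2 += s2.count(chr(c))
--         if t1 < min(n, t2):
--             return False
--     return True
-- ===== Notes on version B (the rewrite author's own statement) =====
-- stated objective: faster
-- what changed: B never sorts: it walks the 128-char ASCII alphabet once, accumulating cumulative character counts of both strings via str.count, and uses the dominance criterion 'for every char c, min(len(s1), #{ch in s2 : ch <= c}) <= #{ch in s1 : ch <= c}' which is equivalent to the per-index comparison of the sorted strings.
import Mathlib
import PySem

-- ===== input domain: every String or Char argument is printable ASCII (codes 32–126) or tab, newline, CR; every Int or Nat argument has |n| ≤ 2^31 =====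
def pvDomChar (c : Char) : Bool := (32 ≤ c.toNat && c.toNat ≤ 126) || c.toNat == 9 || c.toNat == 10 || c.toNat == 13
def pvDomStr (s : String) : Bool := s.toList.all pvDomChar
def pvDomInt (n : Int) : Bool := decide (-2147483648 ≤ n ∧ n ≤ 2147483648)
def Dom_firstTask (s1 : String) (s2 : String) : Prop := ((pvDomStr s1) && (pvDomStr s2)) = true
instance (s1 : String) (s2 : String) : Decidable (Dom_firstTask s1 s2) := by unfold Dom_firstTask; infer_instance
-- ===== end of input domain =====

-- B avoids sorting altogether: it scans the 128-char ASCII alphabet once with cumulative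
-- character counts (str.count) and checks the count-dominance criterion, which is proved
-- equivalent to A's per-index comparison of the two sorted strings.

-- ===== PORT A =====
-- the body of A's counting loop (the comparison-and-increment step)
def firstTaskCmp (shelp1 shelp2 : List Char) (x : Int) (i : Int) : Int :=
  -- Python compares the 1-char strings shelp_1[i] <= shelp_2[i] = code-point order
  match PySem.List.pyGet? shelp1 i, PySem.List.pyGet? shelp2 i with
  | some c1, some c2 => if c1 ≤ c2 then x + 1 else x
  | _, _ => x   -- none = IndexError (shelp_2[i] with len(s2) < len(s1)); excluded by Pre_

def firstTask (s1 : String) (s2 : String) : Bool :=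
  -- shelp_1 = ''.join(sorted(s1)): the join of the single characters is kept as the char list,
  -- so shelp_1[i] is shelp1[i] (exact: joining 1-char strings concatenates exactly those chars)
  let shelp1 : List Char := PySem.List.sorted s1.toList (fun c => c) false
  let shelp2 : List Char := PySem.List.sorted s2.toList (fun c => c) false
  let x : Int :=
    (PySem.List.pyRange 0 (PySem.Str.len s1) 1).foldl (firstTaskCmp shelp1 shelp2) 0
  decide (x = PySem.Str.len s1)

-- ===== PORT B =====
-- the 'for c in range(128)' loop of Source B, with its early 'return False'
def firstTaskAltLoop (s1 s2 : String) (n : Int) : List Nat → Int → Int → Bool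
  | [], _, _ => true
  | c :: cs, t1, t2 =>
    -- t1 += s1.count(chr(c)); t2 += s2.count(chr(c)); if t1 < min(n, t2): return False
    if t1 + (PySem.Str.count s1 (String.ofList [Char.ofNat c]) : Int)
        < min n (t2 + (PySem.Str.count s2 (String.ofList [Char.ofNat c]) : Int)) then false
    else firstTaskAltLoop s1 s2 n cs (t1 + (PySem.Str.count s1 (String.ofList [Char.ofNat c]) : Int))
      (t2 + (PySem.Str.count s2 (String.ofList [Char.ofNat c]) : Int))

def firstTask_alt (s1 : String) (s2 : String) : Bool :=
  firstTaskAltLoop s1 s2 (PySem.Str.len s1) (List.range 128) 0 0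

-- ===== PRECONDITION & SPEC =====
-- A raises IndexError (shelp_2[i]) exactly when len(s1) > len(s2); those inputs are excluded.
def Pre_firstTask (s1 : String) (s2 : String) : Prop := s1.toList.length ≤ s2.toList.length
instance (s1 : String) (s2 : String) : Decidable (Pre_firstTask s1 s2) := by unfold Pre_firstTask; infer_instance
def pvWitness_firstTask : String × String := ("ba", "abc")

def Spec_firstTask (s1 : String) (s2 : String) (out : Bool) : Prop := out = firstTask_alt s1 s2
instance (s1 : String) (s2 : String) (out : Bool) : Decidable (Spec_firstTask s1 s2 out) := by unfold Spec_firstTask; infer_instance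

-- ===== CLAIM (what is proved, stated in full; the proofs are below) =====
def Claim_equal_firstTask : Prop := ∀ (s1 : String) (s2 : String), Dom_firstTask s1 s2 → Pre_firstTask s1 s2 → Spec_firstTask s1 s2 (firstTask s1 s2)

-- ===== LEMMAS AND PROOFS =====

-- number of characters of s with code ≤ c (the cumulative count B accumulates)
def cntLe (s : List Char) (c : Nat) : Nat := s.countP (fun ch => decide (ch.toNat ≤ c))
-- number of characters of s with code < j (B's accumulator before processing code j)
def cntLt (s : List Char) (j : Nat) : Nat := s.countP (fun ch => decide (ch.toNat < j))

theorem char_le_iff (a b : Char) : a ≤ b ↔ a.toNat ≤ b.toNat := by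
  rw [Char.le_def, UInt32.le_iff_toNat_le]; exact Iff.rfl

theorem char_lt_iff (a b : Char) : a < b ↔ a.toNat < b.toNat := by
  rw [Char.lt_def, UInt32.lt_iff_toNat_lt]; exact Iff.rfl

theorem toNat_ofNat_lt (j : Nat) (h : j < 128) : (Char.ofNat j).toNat = j := by
  have hv : Nat.isValidChar j := Or.inl (by omega)
  rw [Char.ofNat, dif_pos hv]; rfl

-- s.count(sub) for a single-character sub is the plain character count
theorem go_single (c : Char) (l : List Char) (acc : Nat) :
    PySem.Chars.count.go [c] l.length l acc = acc + l.count c := by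
  induction l generalizing acc with
  | nil => simp [PySem.Chars.count.go]
  | cons h t ih =>
      show PySem.Chars.count.go [c] (t.length + 1) (h :: t) acc = _
      rw [PySem.Chars.count.go]
      by_cases hc : c = h
      · subst hc; simp [List.isPrefixOf, ih]; omega
      · simp [List.isPrefixOf, Ne.symm hc, hc, ih]

theorem count_single (s : List Char) (c : Char) :
    PySem.Chars.count s [c] = s.count c := by
  simp [PySem.Chars.count, go_single]

theorem count_ofNat (s : List Char) (j : Nat) (hj : j < 128) :
    s.count (Char.ofNat j) = s.countP (fun ch => decide (ch.toNat = j)) := by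
  rw [List.count_eq_countP]
  apply List.countP_congr
  intro ch _
  simp only [decide_eq_true_eq, beq_iff_eq]
  constructor
  · intro h; subst h; exact toNat_ofNat_lt j hj
  · intro h; rw [← h, Char.ofNat_toNat]

theorem cntLt_succ (s : List Char) (j : Nat) :
    cntLt s (j + 1) = cntLt s j + s.countP (fun ch => decide (ch.toNat = j)) := by
  unfold cntLt
  induction s with
  | nil => simp
  | cons h t ih =>
      simp only [List.countP_cons, ih]
      split_ifs <;> simp only [decide_eq_true_eq] at * <;> omega

theorem cntLt_succ_eq_cntLe (s : List Char) (c : Nat) : cntLt s (c + 1) = cntLe s c := by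
  unfold cntLt cntLe
  apply List.countP_congr
  intro ch _
  simp only [decide_eq_true_eq]
  omega

theorem cntLe_le_length (s : List Char) (c : Nat) : cntLe s c ≤ s.length :=
  List.countP_le_length

-- on a sorted char list, position i has code ≤ c exactly when i is below the ≤c-count
theorem sorted_index_le_iff (l : List Char) (hl : l.Pairwise (· ≤ ·)) (c : Nat) :
    ∀ i (h : i < l.length), (l[i].toNat ≤ c ↔ i < cntLe l c) := by
  induction l with
  | nil => intro i h; simp at h
  | cons hd t ih =>
      intro i hi
      have hhd : ∀ x ∈ t, hd ≤ x := (List.pairwise_cons.mp hl).1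
      have ht : t.Pairwise (· ≤ ·) := (List.pairwise_cons.mp hl).2
      match i with
      | 0 =>
          simp only [List.getElem_cons_zero]
          constructor
          · intro h
            unfold cntLe
            simp [h]
          · intro h
            by_contra hc
            have : cntLe (hd :: t) c = 0 := by
              unfold cntLe
              rw [List.countP_eq_zero]
              intro ch hch
              simp only [decide_eq_true_eq]
              rcases List.mem_cons.mp hch with rfl | hmem
              · omega
              · have := (char_le_iff hd ch).mp (hhd ch hmem)
                omega
            omega
      | i + 1 =>
          simp only [List.getElem_cons_succ]
          have hit : i < t.length := by simpa using hi
          rw [ih ht i hit]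
          by_cases hh : hd.toNat ≤ c
          · have : cntLe (hd :: t) c = cntLe t c + 1 := by
              unfold cntLe; simp [hh]
            omega
          · -- hd > c, so every element of t is > c as well: both sides are false
            have htz : cntLe t c = 0 := by
              unfold cntLe
              rw [List.countP_eq_zero]
              intro ch hch
              simp only [decide_eq_true_eq]
              have := (char_le_iff hd ch).mp (hhd ch hch)
              omega
            have : cntLe (hd :: t) c = 0 := by
              unfold cntLe
              unfold cntLe at htz
              simp [hh, htz]
            omega

-- the dominance criterion: sorted(a)[i] ≤ sorted(b)[i] for all i < |a|  ⟺
-- for every code c < 128, min(|a|, #{ch ∈ b : code ≤ c}) ≤ #{ch ∈ a : code ≤ c}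
theorem dominance (a b : List Char) (n : Nat) (hna : n = a.length) (hnb : n ≤ b.length)
    (ha : a.Pairwise (· ≤ ·)) (hb : b.Pairwise (· ≤ ·)) (hbd : ∀ ch ∈ b, ch.toNat < 128) :
    ((∀ i (h1 : i < a.length) (h2 : i < b.length), a[i] ≤ b[i]) ↔
      ∀ c < 128, min n (cntLe b c) ≤ cntLe a c) := by
  constructor
  · intro H c _
    set k := min n (cntLe b c) with hk
    rcases Nat.eq_zero_or_pos k with h0 | hpos
    · omega
    · have hk1n : k - 1 < n := by omega
      have hk1b : k - 1 < cntLe b c := by omega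
      have hk1bl : k - 1 < b.length := by have := cntLe_le_length b c; omega
      have hk1al : k - 1 < a.length := by omega
      have hble : b[k-1].toNat ≤ c := (sorted_index_le_iff b hb c (k-1) hk1bl).mpr hk1b
      have hab := H (k-1) hk1al hk1bl
      have : a[k-1].toNat ≤ c := by
        have := (char_le_iff a[k-1] b[k-1]).mp hab
        omega
      have := (sorted_index_le_iff a ha c (k-1) hk1al).mp this
      omega
  · intro H i h1 h2
    by_contra hlt
    have hba : b[i] < a[i] := lt_of_not_ge hlt
    set c := b[i].toNat with hc
    have hc128 : c < 128 := hbd b[i] (List.getElem_mem h2)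
    have hib : i < cntLe b c := (sorted_index_le_iff b hb c i h2).mp (le_refl _)
    have hia : ¬ i < cntLe a c := by
      intro hcontra
      have := (sorted_index_le_iff a ha c i h1).mpr hcontra
      have := (char_lt_iff b[i] a[i]).mp hba
      omega
    have := H c hc128
    omega

-- ---- A's value: the counting loop counts exactly the comparisons that hold ----

theorem strLen_eq (s : String) : PySem.Str.len s = (s.toList.length : Int) := by
  simp [pysem]

theorem firstTask_eq (s1 s2 : String) (hpre : s1.toList.length ≤ s2.toList.length) :
    firstTask s1 s2 =
      decide (∀ i < s1.toList.length,
        (PySem.List.sorted s1.toList (fun c => c) false).getD i 'A' ≤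
        (PySem.List.sorted s2.toList (fun c => c) false).getD i 'A') := by
  simp only [firstTask]
  set a := PySem.List.sorted s1.toList (fun c => c) false with hA
  set b := PySem.List.sorted s2.toList (fun c => c) false with hB
  have hal : a.length = s1.toList.length := PySem.List.length_sorted _ _ _
  have hbl : b.length = s2.toList.length := PySem.List.length_sorted _ _ _
  rw [strLen_eq, PySem.List.pyRange_zero_natCast, List.foldl_map]
  have hcongr : ∀ (x : Int) (k : Nat), k ∈ List.range s1.toList.length →
      firstTaskCmp a b x (k : Int) =
      (if a.getD k 'A' ≤ b.getD k 'A' then x + 1 else x) := by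
    intro x k hk
    have hkn : k < s1.toList.length := List.mem_range.mp hk
    have hka : k < a.length := by omega
    have hkb : k < b.length := by omega
    unfold firstTaskCmp
    rw [PySem.List.pyGet?_natCast, PySem.List.pyGet?_natCast,
        List.getElem?_eq_getElem hka, List.getElem?_eq_getElem hkb,
        List.getD_eq_getElem a 'A' hka, List.getD_eq_getElem b 'A' hkb]
  have hfold : List.foldl (fun (x : Int) (y : Nat) => firstTaskCmp a b x (y : Int)) 0 (List.range s1.toList.length)
      = List.foldl (fun (x : Int) (k : Nat) => if a.getD k 'A' ≤ b.getD k 'A' then x + 1 else x) 0 (List.range s1.toList.length) :=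
    PySem.List.foldl_congr_mem _ _ _ _ hcongr
  rw [hfold, PySem.List.foldl_ite_add_one (fun k => a.getD k 'A' ≤ b.getD k 'A')]
  rw [decide_eq_decide]
  rw [zero_add]
  constructor
  · intro h
    have hcp : (List.range s1.toList.length).countP (fun k => decide (a.getD k 'A' ≤ b.getD k 'A')) = (List.range s1.toList.length).length := by
      rw [List.length_range]; exact_mod_cast h
    intro i hi
    have := List.countP_eq_length.mp hcp i (List.mem_range.mpr hi)
    simpa using this
  · intro h
    have hcp : (List.range s1.toList.length).countP (fun k => decide (a.getD k 'A' ≤ b.getD k 'A')) = (List.range s1.toList.length).length :=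
      List.countP_eq_length.mpr (fun i hi => by simpa using h i (List.mem_range.mp hi))
    rw [hcp, List.length_range]

-- ---- B's value: the alphabet loop checks dominance of the cumulative counts ----

theorem altLoop_eq (s1 s2 : String) (h1 : ∀ ch ∈ s1.toList, ch.toNat < 128)
    (h2 : ∀ ch ∈ s2.toList, ch.toNat < 128) :
    ∀ (k j : Nat), j + k = 128 →
      firstTaskAltLoop s1 s2 (PySem.Str.len s1) (List.range' j k)
        (cntLt s1.toList j : Int) (cntLt s2.toList j : Int) =
      decide (∀ c : Nat, c < 128 → j ≤ c →
        min (PySem.Str.len s1) (cntLe s2.toList c : Int) ≤ (cntLe s1.toList c : Int)) := by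
  intro k
  induction k with
  | zero =>
      intro j hj
      have : (List.range' j 0) = [] := rfl
      rw [this]
      unfold firstTaskAltLoop
      symm
      rw [decide_eq_true_iff]
      intro c hc hjc
      omega
  | succ k ih =>
      intro j hj
      have hj128 : j < 128 := by omega
      rw [List.range'_succ]
      unfold firstTaskAltLoop
      have hstep : ∀ s : String, (∀ ch ∈ s.toList, ch.toNat < 128) →
          (cntLt s.toList j : Int) + (PySem.Str.count s (String.ofList [Char.ofNat j]) : Int)
            = (cntLe s.toList j : Int) := by
        intro s _
        rw [PySem.Str.count_eq]
        have : (String.ofList [Char.ofNat j]).toList = [Char.ofNat j] := String.toList_ofList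
        rw [this, count_single, count_ofNat _ j hj128, ← cntLt_succ_eq_cntLe, cntLt_succ]
        push_cast
        ring
      rw [hstep s1 h1, hstep s2 h2]
      by_cases hfail : (cntLe s1.toList j : Int) < min (PySem.Str.len s1) (cntLe s2.toList j : Int)
      · rw [if_pos hfail]
        symm
        rw [decide_eq_false_iff_not]
        intro hall
        have := hall j hj128 (le_refl j)
        omega
      · rw [if_neg hfail]
        have hrec := ih (j + 1) (by omega)
        rw [cntLt_succ_eq_cntLe, cntLt_succ_eq_cntLe] at hrec
        rw [hrec, decide_eq_decide]
        constructor
        · intro h c hc hjc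
          rcases Nat.eq_or_lt_of_le hjc with rfl | hlt
          · omega
          · exact h c hc hlt
        · intro h c hc hjc
          exact h c hc (by omega)

theorem firstTask_alt_eq (s1 s2 : String) (h1 : ∀ ch ∈ s1.toList, ch.toNat < 128)
    (h2 : ∀ ch ∈ s2.toList, ch.toNat < 128) :
    firstTask_alt s1 s2 =
      decide (∀ c : Nat, c < 128 →
        min (PySem.Str.len s1) (cntLe s2.toList c : Int) ≤ (cntLe s1.toList c : Int)) := by
  unfold firstTask_alt
  have h0 : ∀ s : List Char, cntLt s 0 = 0 := by
    intro s; unfold cntLt; rw [List.countP_eq_zero]; intro ch _; simp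
  have halt := altLoop_eq s1 s2 h1 h2 128 0 rfl
  simp only [h0, Nat.cast_zero] at halt
  rw [List.range_eq_range', halt, decide_eq_decide]
  exact ⟨fun h c hc => h c hc (Nat.zero_le c), fun h c hc _ => h c hc⟩

theorem dom_chars (s : String) (h : pvDomStr s = true) : ∀ ch ∈ s.toList, ch.toNat < 128 := by
  intro ch hch
  have := List.all_eq_true.mp h ch hch
  unfold pvDomChar at this
  simp only [Bool.or_eq_true, Bool.and_eq_true, decide_eq_true_eq, beq_iff_eq] at this
  omega

-- ===== VERDICT (by name: the statement is the Claim_ definition above) =====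
theorem firstTask_spec : Claim_equal_firstTask := by
  intro s1 s2 hdom hpre
  unfold Spec_firstTask
  have hdom' : pvDomStr s1 = true ∧ pvDomStr s2 = true := by
    unfold Dom_firstTask at hdom; simpa using hdom
  have h1 := dom_chars s1 hdom'.1
  have h2 := dom_chars s2 hdom'.2
  unfold Pre_firstTask at hpre
  rw [firstTask_eq s1 s2 hpre, firstTask_alt_eq s1 s2 h1 h2, decide_eq_decide]
  set a := PySem.List.sorted s1.toList (fun c => c) false with hA
  set b := PySem.List.sorted s2.toList (fun c => c) false with hB
  have hal : a.length = s1.toList.length := PySem.List.length_sorted _ _ _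
  have hbl : b.length = s2.toList.length := PySem.List.length_sorted _ _ _
  have hpa : a.Pairwise (· ≤ ·) := PySem.List.sorted_pairwise s1.toList (fun c => c)
  have hpb : b.Pairwise (· ≤ ·) := PySem.List.sorted_pairwise s2.toList (fun c => c)
  have hca : ∀ c, cntLe s1.toList c = cntLe a c := by
    intro c; unfold cntLe; exact (List.Perm.countP_eq _ (PySem.List.sorted_perm _ _ _)).symm
  have hcb : ∀ c, cntLe s2.toList c = cntLe b c := by
    intro c; unfold cntLe; exact (List.Perm.countP_eq _ (PySem.List.sorted_perm _ _ _)).symm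
  have hbd : ∀ ch ∈ b, ch.toNat < 128 := by
    intro ch hch
    exact h2 ch ((PySem.List.sorted_perm _ _ _).mem_iff.mp hch)
  have hdomi := dominance a b s1.toList.length hal.symm (by omega) hpa hpb hbd
  constructor
  · intro H c hc
    have := hdomi.mp (by
      intro i hi1 hi2
      have := H i (by omega)
      rwa [List.getD_eq_getElem a 'A' hi1, List.getD_eq_getElem b 'A' hi2] at this) c hc
    rw [hca, hcb, strLen_eq]
    omega
  · intro H i hi
    have hi1 : i < a.length := by omega
    have hi2 : i < b.length := by omega
    rw [List.getD_eq_getElem a 'A' hi1, List.getD_eq_getElem b 'A' hi2]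
    refine hdomi.mpr ?_ i hi1 hi2
    intro c hc
    have := H c hc
    rw [hca, hcb, strLen_eq] at this
    omega
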